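-- pv_equiv track=rewrite | github.com/H4ckd4ddy/car-nage.io | map.py | open_maze
-- ===== SOURCE A (Python) =====
-- def open_maze(maze, step=4):
--     for row in range(1,len(maze)-1, step):
--         for column in range(1,len(maze[0])-1):
--             maze[row][column] = ' '
--     for row in range(1,len(maze)-1):
--         for column in range(1,len(maze[0])-1, step):
--             maze[row][column] = ' '
--     return maze
-- ===== SOURCE B (Python) =====
-- def open_maze(maze, step=4):
--     width = len(maze[0]) if maze else 0
--     row_marks = set(range(1, len(maze) - 1, step))
--     col_marks = set(range(1, width - 1, step))
--     return [[' ' if (r in row_marks and 1 <= c < width - 1)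
--                  or (1 <= r < len(maze) - 1 and c in col_marks) else cell
--              for c, cell in enumerate(line)]
--             for r, line in enumerate(maze)]
-- ===== Notes on version B (the rewrite author's own statement) =====
-- stated objective: alternative
-- what changed: A carves corridors by two in-place strided write passes (full interior rows on the row stride, then strided columns in every interior row); B never mutates: it precomputes the strided row and column index sets once and rebuilds the grid in a single functional sweep, deciding per cell whether it lies on a corridor row or a corridor column.
import Mathlib
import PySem

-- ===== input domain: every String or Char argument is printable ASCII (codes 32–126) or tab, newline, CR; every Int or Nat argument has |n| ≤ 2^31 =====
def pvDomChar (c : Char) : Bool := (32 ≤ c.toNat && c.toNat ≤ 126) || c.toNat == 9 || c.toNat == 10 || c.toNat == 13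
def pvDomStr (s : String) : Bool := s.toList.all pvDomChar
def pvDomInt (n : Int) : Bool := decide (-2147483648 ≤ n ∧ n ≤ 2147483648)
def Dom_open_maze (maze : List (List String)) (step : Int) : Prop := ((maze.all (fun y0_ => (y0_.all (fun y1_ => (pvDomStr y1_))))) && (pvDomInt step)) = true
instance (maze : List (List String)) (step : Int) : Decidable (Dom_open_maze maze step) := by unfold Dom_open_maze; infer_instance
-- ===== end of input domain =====

-- B rebuilds the grid in one functional pass, deciding per cell whether it lies on a corridor row
-- or a corridor column, instead of A's two in-place strided write passes (objective: alternative).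
-- A mutates `maze` in place and returns it, B returns a fresh grid: the equivalence proved here is
-- about the RETURN value only.

-- the single Python statement `maze[row][column] = ' '` of A
def pvSetCell (mz : List (List String)) (r c : Int) : List (List String) :=
  PySem.List.pySetD mz r (PySem.List.pySetD (PySem.List.pyGetD mz r []) c " ")

-- ===== PORT A =====
def open_maze (maze : List (List String)) (step : Int) : List (List String) :=
  let m1 := (PySem.List.pyRange 1 ((maze.length : Int) - 1) step).foldl
      (fun mz row =>
        (PySem.List.pyRange 1 (((PySem.List.pyGetD mz 0 []).length : Int) - 1) 1).foldl
          (fun mz2 column => pvSetCell mz2 row column) mz)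
      maze
  (PySem.List.pyRange 1 ((m1.length : Int) - 1) 1).foldl
      (fun mz row =>
        (PySem.List.pyRange 1 (((PySem.List.pyGetD mz 0 []).length : Int) - 1) step).foldl
          (fun mz2 column => pvSetCell mz2 row column) mz)
      m1

-- ===== PORT B =====
def open_maze_alt (maze : List (List String)) (step : Int) : List (List String) :=
  let width : Int := if maze.isEmpty then 0 else ((PySem.List.pyGetD maze 0 []).length : Int)
  let rowMarks : PySem.Set Int :=
    PySem.Set.ofList (PySem.List.pyRange 1 ((maze.length : Int) - 1) step)
  let colMarks : PySem.Set Int :=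
    PySem.Set.ofList (PySem.List.pyRange 1 (width - 1) step)
  (PySem.List.enumerate maze).map (fun rl =>
    (PySem.List.enumerate rl.2).map (fun cc =>
      if (PySem.Set.contains rowMarks rl.1 && decide (1 ≤ cc.1 ∧ cc.1 < width - 1))
         || (decide (1 ≤ rl.1 ∧ rl.1 < (maze.length : Int) - 1) && PySem.Set.contains colMarks cc.1)
      then " " else cc.2))

-- ===== PRECONDITION & SPEC =====
-- Pre_ excludes exactly the inputs on which Python A raises: step == 0 (ValueError from range)
-- and ragged/degenerate grids on which some write maze[row][column] (or the read maze[0]) is out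
-- of range (IndexError); on every other input A returns, so nothing A returns on is narrowed away.
def Pre_open_maze (maze : List (List String)) (step : Int) : Prop :=
  step ≠ 0 ∧
  (∀ r ∈ PySem.List.pyRange 1 ((maze.length : Int) - 1) step,
      1 ≤ maze.length ∧
      (3 ≤ (maze.headD []).length →
        r < (maze.length : Int) ∧
        ((maze.headD []).length : Int) - 1 ≤ ((maze.getD r.toNat []).length : Int))) ∧
  (∀ r ∈ PySem.List.pyRange 1 ((maze.length : Int) - 1) 1,
      ∀ c ∈ PySem.List.pyRange 1 (((maze.headD []).length : Int) - 1) step,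
        c < ((maze.getD r.toNat []).length : Int))
instance (maze : List (List String)) (step : Int) : Decidable (Pre_open_maze maze step) := by
  unfold Pre_open_maze; infer_instance

def pvWitness_open_maze : List (List String) × Int :=
  ([[ "#", "#", "#", "#"], ["#", "#", "#", "#"], ["#", "#", "#", "#"], ["#", "#", "#", "#"]], 2)

def Spec_open_maze (maze : List (List String)) (step : Int) (out : List (List String)) : Prop := out = open_maze_alt maze step
instance (maze : List (List String)) (step : Int) (out : List (List String)) : Decidable (Spec_open_maze maze step out) := by unfold Spec_open_maze; infer_instance

-- ===== CLAIM (what is proved, stated in full; the proofs are below) =====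
def Claim_equal_open_maze : Prop := ∀ (maze : List (List String)) (step : Int), Dom_open_maze maze step → Pre_open_maze maze step → Spec_open_maze maze step (open_maze maze step)

-- ===== LEMMAS AND PROOFS =====

-- applying a list of (row, column) writes in order (characterises A)
def pvApply (L : List (Int × Int)) (mz : List (List String)) : List (List String) :=
  L.foldl (fun m p => pvSetCell m p.1 p.2) mz

-- the row × column grid of writes of a rectangular double loop
def pvPairs (R C : List Int) : List (Int × Int) :=
  R.flatMap (fun r => C.map (fun c => (r, c)))

-- marking a grid by a per-cell predicate (characterises B)
def pvGrid (mz : List (List String)) (P : Int → Int → Bool) : List (List String) :=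
  (PySem.List.enumerate mz).map (fun rl =>
    (PySem.List.enumerate rl.2).map (fun cc => if P rl.1 cc.1 then " " else cc.2))

theorem pv_mem_pyRange_nonneg {b s x : Int} (hb : -1 ≤ b) (hx : x ∈ PySem.List.pyRange 1 b s) :
    0 ≤ x := by
  by_cases hs0 : s = 0
  · simp [PySem.List.pyRange, hs0] at hx
  rcases lt_or_gt_of_ne hs0 with hneg | hpos
  · simp only [PySem.List.pyRange, if_neg hs0, if_neg (not_lt.2 hneg.le)] at hx
    by_cases hb1 : b < 1
    · simp only [if_pos hb1, List.mem_map, List.mem_range] at hx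
      obtain ⟨k, hk, rfl⟩ := hx
      have ht : (0:Int) < -s := by omega
      have hkc : (k:Int) ≤ (1 - b + -s - 1) / -s - 1 := by
        have : (k:Int) < (((1 - b + -s - 1) / -s).toNat : Int) := by exact_mod_cast hk
        omega
      have hdiv : -s * ((1 - b + -s - 1) / -s) ≤ 1 - b + -s - 1 := by
        have := Int.emod_nonneg (1 - b + -s - 1) (by omega : -s ≠ 0)
        have := Int.mul_ediv_add_emod (1 - b + -s - 1) (-s)
        omega
      nlinarith [Int.mul_le_mul_of_nonneg_left hkc (le_of_lt ht)]
    · simp [if_neg hb1] at hx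
  · have := (PySem.List.mem_pyRange_iff_of_pos hpos x).1 hx
    omega

theorem pvSetCell_eq (mz : List (List String)) {r c : Int} (hr : 0 ≤ r) (hc : 0 ≤ c) :
    pvSetCell mz r c = mz.set r.toNat ((mz.getD r.toNat []).set c.toNat " ") := by
  unfold pvSetCell
  rw [PySem.List.pyGetD_of_nonneg _ _ hr, PySem.List.pySetD_of_nonneg _ _ hc,
    PySem.List.pySetD_of_nonneg _ _ hr]

theorem pvSetCell_length (mz : List (List String)) (r c : Int) :
    (pvSetCell mz r c).length = mz.length := by
  unfold pvSetCell; exact PySem.List.length_pySetD _ _ _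

theorem pvSetCell_rowlen (mz : List (List String)) {r c : Int} (hr : 0 ≤ r) (hc : 0 ≤ c) (i : Nat) :
    ((pvSetCell mz r c).getD i []).length = (mz.getD i []).length := by
  rw [pvSetCell_eq mz hr hc]
  simp only [List.getD, List.getElem?_set]
  by_cases h : r.toNat = i
  · subst h
    by_cases hlt : r.toNat < mz.length
    · simp [hlt]
    · simp [hlt]
  · simp [h]

theorem pvSetCell_getD (mz : List (List String)) {r c : Int} (hr : 0 ≤ r) (hc : 0 ≤ c) (i j : Nat) :
    ((pvSetCell mz r c).getD i []).getD j "" =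
      if r = (i : Int) ∧ c = (j : Int) ∧ i < mz.length ∧ j < (mz.getD i []).length then " "
      else (mz.getD i []).getD j "" := by
  rw [pvSetCell_eq mz hr hc]
  by_cases hri : r = (i : Int)
  · have hrn : r.toNat = i := by omega
    by_cases hlt : i < mz.length
    · have hrow : mz.getD i [] = mz[i] := by simp [List.getD, List.getElem?_eq_getElem hlt]
      by_cases hcj : c = (j : Int)
      · have hcn : c.toNat = j := by omega
        by_cases hjl : j < mz[i].length
        · rw [if_pos ⟨hri, hcj, hlt, by rw [hrow]; exact hjl⟩]
          simp [List.getD, hrn, hcn, hlt, hjl]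
        · rw [if_neg (by rw [hrow]; rintro ⟨-, -, -, h⟩; exact hjl h)]
          simp [List.getD, hrn, hcn, hlt, hjl]
      · rw [if_neg (by rintro ⟨-, h, -⟩; exact hcj h)]
        have hcn : c.toNat ≠ j := by omega
        simp [List.getD, hrn, hcn, hlt]
    · rw [if_neg (by rintro ⟨-, -, h, -⟩; exact hlt h)]
      have h1 : mz.set i ((mz.getD i []).set c.toNat " ") = mz := by
        apply List.set_eq_of_length_le; omega
      rw [hrn, h1]
  · rw [if_neg (by rintro ⟨h, -⟩; exact hri h)]
    have hrn : r.toNat ≠ i := by omega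
    simp [List.getD, hrn]

theorem pvApply_nil (mz : List (List String)) : pvApply [] mz = mz := rfl

theorem pvApply_cons (p : Int × Int) (L : List (Int × Int)) (mz : List (List String)) :
    pvApply (p :: L) mz = pvApply L (pvSetCell mz p.1 p.2) := rfl

theorem pvApply_append (L1 L2 : List (Int × Int)) (mz : List (List String)) :
    pvApply (L1 ++ L2) mz = pvApply L2 (pvApply L1 mz) := List.foldl_append

theorem pvApply_length (L : List (Int × Int)) (mz : List (List String)) :
    (pvApply L mz).length = mz.length := by
  induction L generalizing mz with
  | nil => rfl
  | cons p L ih => rw [pvApply_cons, ih, pvSetCell_length]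

theorem pvApply_rowlen (L : List (Int × Int)) (mz : List (List String))
    (hL : ∀ p ∈ L, 0 ≤ p.1 ∧ 0 ≤ p.2) (i : Nat) :
    ((pvApply L mz).getD i []).length = (mz.getD i []).length := by
  induction L generalizing mz with
  | nil => rfl
  | cons p L ih =>
    rw [pvApply_cons, ih _ (fun q hq => hL q (List.mem_cons_of_mem _ hq)),
      pvSetCell_rowlen mz (hL p List.mem_cons_self).1 (hL p List.mem_cons_self).2]

theorem pvApply_getD (L : List (Int × Int)) (mz : List (List String))
    (hL : ∀ p ∈ L, 0 ≤ p.1 ∧ 0 ≤ p.2) (i j : Nat) :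
    ((pvApply L mz).getD i []).getD j "" =
      if ((i : Int), (j : Int)) ∈ L ∧ i < mz.length ∧ j < (mz.getD i []).length then " "
      else (mz.getD i []).getD j "" := by
  induction L generalizing mz with
  | nil => simp [pvApply_nil]
  | cons p L ih =>
    rw [pvApply_cons, ih _ (fun q hq => hL q (List.mem_cons_of_mem _ hq)),
      pvSetCell_length, pvSetCell_rowlen mz (hL p List.mem_cons_self).1 (hL p List.mem_cons_self).2,
      pvSetCell_getD mz (hL p List.mem_cons_self).1 (hL p List.mem_cons_self).2]
    rcases p with ⟨a, b⟩
    have hpq : (((i : Int), (j : Int)) ∈ (a, b) :: L) ↔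
        ((a = (i : Int) ∧ b = (j : Int)) ∨ ((i : Int), (j : Int)) ∈ L) := by
      simp only [List.mem_cons, Prod.mk.injEq, eq_comm]
    simp only [hpq]
    split_ifs <;> first | rfl | tauto

theorem pv_lists_ext (x y : List (List String)) (hl : x.length = y.length)
    (hrl : ∀ i, (x.getD i []).length = (y.getD i []).length)
    (hc : ∀ i j, (x.getD i []).getD j "" = (y.getD i []).getD j "") : x = y := by
  apply List.ext_getElem hl
  intro i h1 h2
  have hx : x.getD i [] = x[i] := List.getD_eq_getElem x [] h1
  have hy : y.getD i [] = y[i] := List.getD_eq_getElem y [] h2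
  have hrow : x[i].length = y[i].length := by rw [← hx, ← hy]; exact hrl i
  apply List.ext_getElem hrow
  intro j j1 j2
  have := hc i j
  rwa [hx, hy, List.getD_eq_getElem _ _ j1, List.getD_eq_getElem _ _ j2] at this

-- a nested for-loop over rows × (columns computed from the current len(maze[0])) is the pvApply
-- of its write-pair grid: the shape of row 0 (hence the column bound) is invariant under writes
theorem pv_nested_to_pairs (R : List Int) (g : Int → Nat → List Int) (mz : List (List String))
    (hR : ∀ r ∈ R, 0 ≤ r) (hg : ∀ r w, ∀ c ∈ g r w, 0 ≤ c) :
    R.foldl (fun m r =>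
        (g r (PySem.List.pyGetD m 0 []).length).foldl (fun m2 c => pvSetCell m2 r c) m) mz
      = pvApply (R.flatMap (fun r =>
          (g r (PySem.List.pyGetD mz 0 []).length).map (fun c => (r, c)))) mz := by
  induction R generalizing mz with
  | nil => rfl
  | cons r R ih =>
    have hr0 : 0 ≤ r := hR r List.mem_cons_self
    have hmap : ∀ (C : List Int) (m : List (List String)),
        pvApply (C.map (fun c => (r, c))) m = C.foldl (fun m2 c => pvSetCell m2 r c) m := by
      intro C m; unfold pvApply; rw [List.foldl_map]
    set w0 := (PySem.List.pyGetD mz 0 []).length with hw0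
    set mz' := (g r w0).foldl (fun m2 c => pvSetCell m2 r c) mz with hmz'
    have hmz'p : mz' = pvApply ((g r w0).map (fun c => (r, c))) mz := by
      rw [hmap]
    have hnn : ∀ p ∈ (g r w0).map (fun c => (r, c)), 0 ≤ p.1 ∧ 0 ≤ p.2 := by
      intro p hp
      simp only [List.mem_map] at hp
      obtain ⟨c, hc, rfl⟩ := hp
      exact ⟨hr0, hg r w0 c hc⟩
    have hwinv : (PySem.List.pyGetD mz' 0 []).length = w0 := by
      rw [hw0, hmz'p, PySem.List.pyGetD_of_nonneg _ _ (le_refl (0:Int)),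
        PySem.List.pyGetD_of_nonneg _ _ (le_refl (0:Int))]
      exact pvApply_rowlen _ _ hnn _
    calc (r :: R).foldl (fun m r =>
            (g r (PySem.List.pyGetD m 0 []).length).foldl (fun m2 c => pvSetCell m2 r c) m) mz
        = R.foldl (fun m r =>
            (g r (PySem.List.pyGetD m 0 []).length).foldl (fun m2 c => pvSetCell m2 r c) m) mz' := by
          rfl
      _ = pvApply (R.flatMap (fun r =>
            (g r (PySem.List.pyGetD mz' 0 []).length).map (fun c => (r, c)))) mz' :=
          ih mz' (fun q hq => hR q (List.mem_cons_of_mem _ hq))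
      _ = pvApply (R.flatMap (fun r => (g r w0).map (fun c => (r, c)))) mz' := by rw [hwinv]
      _ = pvApply ((g r w0).map (fun c => (r, c)) ++
            R.flatMap (fun r => (g r w0).map (fun c => (r, c)))) mz := by
          rw [pvApply_append, hmz'p]
      _ = pvApply ((r :: R).flatMap (fun r => (g r w0).map (fun c => (r, c)))) mz := by
          rw [List.flatMap_cons]

theorem pv_mem_pvPairs (R C : List Int) (x y : Int) :
    ((x, y) ∈ pvPairs R C) ↔ (x ∈ R ∧ y ∈ C) := by
  simp only [pvPairs, List.mem_flatMap, List.mem_map, Prod.mk.injEq]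
  constructor
  · rintro ⟨r, hr, c, hc, rfl, rfl⟩; exact ⟨hr, hc⟩
  · rintro ⟨hx, hy⟩; exact ⟨x, hx, y, hy, rfl, rfl⟩

theorem pvPairs_nonneg (R C : List Int) (hR : ∀ r ∈ R, 0 ≤ r) (hC : ∀ c ∈ C, 0 ≤ c) :
    ∀ p ∈ pvPairs R C, 0 ≤ p.1 ∧ 0 ≤ p.2 := by
  rintro ⟨x, y⟩ hp
  rw [pv_mem_pvPairs] at hp
  exact ⟨hR x hp.1, hC y hp.2⟩

theorem pvGrid_length (mz : List (List String)) (P : Int → Int → Bool) :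
    (pvGrid mz P).length = mz.length := by
  simp [pvGrid, PySem.List.length_enumerate]

theorem pvGrid_getD (mz : List (List String)) (P : Int → Int → Bool) (i : Nat) :
    (pvGrid mz P).getD i [] =
      (PySem.List.enumerate (mz.getD i [])).map
        (fun cc => if P (i : Int) cc.1 then " " else cc.2) := by
  by_cases hi : i < mz.length
  · unfold pvGrid
    rw [List.getD, List.getElem?_map, PySem.List.getElem?_enumerate,
      List.getElem?_eq_getElem hi]
    simp [List.getD, List.getElem?_eq_getElem hi]
  · have h1 : (pvGrid mz P).getD i [] = [] := by
      apply List.getD_eq_default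
      rw [pvGrid_length]; omega
    have h2 : mz.getD i [] = [] := by
      apply List.getD_eq_default; omega
    rw [h1, h2, PySem.List.enumerate_nil]; rfl

theorem pvGrid_rowlen (mz : List (List String)) (P : Int → Int → Bool) (i : Nat) :
    ((pvGrid mz P).getD i []).length = (mz.getD i []).length := by
  rw [pvGrid_getD]
  simp [PySem.List.length_enumerate]

theorem pvGrid_cell (mz : List (List String)) (P : Int → Int → Bool) (i j : Nat) :
    ((pvGrid mz P).getD i []).getD j "" =
      if j < (mz.getD i []).length ∧ P (i : Int) (j : Int) then " "
      else (mz.getD i []).getD j "" := by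
  rw [pvGrid_getD]
  by_cases hj : j < (mz.getD i []).length
  · rw [List.getD, List.getElem?_map, PySem.List.getElem?_enumerate,
      List.getElem?_eq_getElem hj]
    simp only [Option.map_some, Option.getD_some, Int.zero_add,
      List.getD_eq_getElem _ _ hj]
    by_cases hp : P (i : Int) (j : Int) = true
    · rw [if_pos hp, if_pos ⟨hj, hp⟩]
    · rw [if_neg hp, if_neg (by rintro ⟨-, h⟩; exact hp h)]
  · rw [if_neg (by rintro ⟨h, -⟩; exact hj h)]
    rw [List.getD_eq_default, List.getD_eq_default]
    · omega
    · rw [List.length_map, PySem.List.length_enumerate]; omega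

-- B is pvGrid of its per-cell predicate
theorem open_maze_alt_eq_pvGrid (maze : List (List String)) (step : Int) :
    open_maze_alt maze step =
      pvGrid maze (fun r c =>
        (PySem.Set.contains
            (PySem.Set.ofList (PySem.List.pyRange 1 ((maze.length : Int) - 1) step)) r
          && decide (1 ≤ c ∧ c < (if maze.isEmpty then 0
              else ((PySem.List.pyGetD maze 0 []).length : Int)) - 1))
        || (decide (1 ≤ r ∧ r < (maze.length : Int) - 1)
          && PySem.Set.contains
              (PySem.Set.ofList (PySem.List.pyRange 1 ((if maze.isEmpty then 0
                else ((PySem.List.pyGetD maze 0 []).length : Int)) - 1) step)) c)) := rfl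

-- ===== VERDICT (by name: the statement is the Claim_ definition above) =====
theorem open_maze_spec : Claim_equal_open_maze := by
  intro maze step hdom hpre
  unfold Spec_open_maze
  obtain ⟨hs0, hp1, hp2⟩ := hpre
  set w0 : Nat := (PySem.List.pyGetD maze 0 []).length with hw0def
  set R1 : List Int := PySem.List.pyRange 1 ((maze.length : Int) - 1) step with hR1def
  set Full : List Int := PySem.List.pyRange 1 ((w0 : Int) - 1) 1 with hFulldef
  set Str : List Int := PySem.List.pyRange 1 ((w0 : Int) - 1) step with hStrdef
  have hcol : ∀ (w : Nat) (k c : Int), c ∈ PySem.List.pyRange 1 ((w : Int) - 1) k → 0 ≤ c :=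
    fun w k c hc => pv_mem_pyRange_nonneg (by omega) hc
  have hR1n : ∀ r ∈ R1, 0 ≤ r := fun r hr => pv_mem_pyRange_nonneg (by omega) hr
  have hRowsn : ∀ r ∈ PySem.List.pyRange 1 ((maze.length : Int) - 1) 1, 0 ≤ r :=
    fun r hr => pv_mem_pyRange_nonneg (by omega) hr
  have hFulln : ∀ c ∈ Full, 0 ≤ c := fun c hc => hcol w0 1 c hc
  have hStrn : ∀ c ∈ Str, 0 ≤ c := fun c hc => hcol w0 step c hc
  -- pass 1 of A as a pair grid
  have e1 : (PySem.List.pyRange 1 ((maze.length : Int) - 1) step).foldl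
      (fun mz row =>
        (PySem.List.pyRange 1 (((PySem.List.pyGetD mz 0 []).length : Int) - 1) 1).foldl
          (fun mz2 column => pvSetCell mz2 row column) mz) maze
      = pvApply (pvPairs R1 Full) maze :=
    pv_nested_to_pairs R1 (fun _ w => PySem.List.pyRange 1 ((w : Int) - 1) 1) maze hR1n
      (fun r w c hc => hcol w 1 c hc)
  have hA1n : ∀ p ∈ pvPairs R1 Full, 0 ≤ p.1 ∧ 0 ≤ p.2 := pvPairs_nonneg _ _ hR1n hFulln
  have hA2n : ∀ p ∈ pvPairs (PySem.List.pyRange 1 ((maze.length : Int) - 1) 1) Str,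
      0 ≤ p.1 ∧ 0 ≤ p.2 := pvPairs_nonneg _ _ hRowsn hStrn
  have e1len : (pvApply (pvPairs R1 Full) maze).length = maze.length := pvApply_length _ _
  have e1w : (PySem.List.pyGetD (pvApply (pvPairs R1 Full) maze) 0 []).length = w0 := by
    rw [hw0def, PySem.List.pyGetD_of_nonneg _ _ (le_refl (0:Int)),
      PySem.List.pyGetD_of_nonneg _ _ (le_refl (0:Int))]
    exact pvApply_rowlen _ _ hA1n _
  -- pass 2 of A as a pair grid
  have e2 : (PySem.List.pyRange 1 (((pvApply (pvPairs R1 Full) maze).length : Int) - 1) 1).foldl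
      (fun mz row =>
        (PySem.List.pyRange 1 (((PySem.List.pyGetD mz 0 []).length : Int) - 1) step).foldl
          (fun mz2 column => pvSetCell mz2 row column) mz) (pvApply (pvPairs R1 Full) maze)
      = pvApply (pvPairs (PySem.List.pyRange 1 ((maze.length : Int) - 1) 1) Str)
          (pvApply (pvPairs R1 Full) maze) := by
    have base := pv_nested_to_pairs (PySem.List.pyRange 1 ((maze.length : Int) - 1) 1)
      (fun _ w => PySem.List.pyRange 1 ((w : Int) - 1) step)
      (pvApply (pvPairs R1 Full) maze) hRowsn (fun r w c hc => hcol w step c hc)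
    rw [e1w] at base
    rw [e1len]
    exact base
  have hA0 : open_maze maze step
      = pvApply (pvPairs R1 Full ++
          pvPairs (PySem.List.pyRange 1 ((maze.length : Int) - 1) 1) Str) maze := by
    have h0 : open_maze maze step
        = (PySem.List.pyRange 1 (((pvApply (pvPairs R1 Full) maze).length : Int) - 1) 1).foldl
            (fun mz row =>
              (PySem.List.pyRange 1 (((PySem.List.pyGetD mz 0 []).length : Int) - 1) step).foldl
                (fun mz2 column => pvSetCell mz2 row column) mz)
            (pvApply (pvPairs R1 Full) maze) := by
      rw [← e1]; rfl
    rw [h0, e2, pvApply_append]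
  set L := pvPairs R1 Full ++
      pvPairs (PySem.List.pyRange 1 ((maze.length : Int) - 1) 1) Str with hLdef
  have hLn : ∀ p ∈ L, 0 ≤ p.1 ∧ 0 ≤ p.2 := by
    rintro p hp
    rcases List.mem_append.1 hp with h | h
    · exact hA1n p h
    · exact hA2n p h
  rw [hA0, open_maze_alt_eq_pvGrid]
  apply pv_lists_ext
  · rw [pvApply_length, pvGrid_length]
  · intro i; rw [pvApply_rowlen _ _ hLn, pvGrid_rowlen]
  · intro i j
    rw [pvApply_getD _ _ hLn, pvGrid_cell]
    by_cases hi : i < maze.length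
    · -- maze is nonempty, so Source B's `width` is w0
      have hne : maze ≠ [] := by intro h; rw [h] at hi; simp at hi
      have hwid : (if maze.isEmpty then 0
          else ((PySem.List.pyGetD maze 0 []).length : Int)) = (w0 : Int) := by
        rw [if_neg (by simpa [List.isEmpty_iff] using hne), hw0def]
      rw [hwid]
      by_cases hj : j < (maze.getD i []).length
      · -- in-range cell: the two conditions are the same cell set
        have hmem : (((i : Int), (j : Int)) ∈ L) ↔
            ((PySem.Set.contains (PySem.Set.ofList R1) (i : Int)
                && decide (1 ≤ (j : Int) ∧ (j : Int) < (w0 : Int) - 1))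
              || (decide (1 ≤ (i : Int) ∧ (i : Int) < (maze.length : Int) - 1)
                && PySem.Set.contains (PySem.Set.ofList Str) (j : Int))) = true := by
          rw [hLdef, List.mem_append, pv_mem_pvPairs, pv_mem_pvPairs]
          have c1 : PySem.Set.contains (PySem.Set.ofList R1) (i : Int) = true ↔ (i : Int) ∈ R1 :=
            (PySem.Set.contains_iff _ _).trans (PySem.Set.mem_ofList _ _)
          have c2 : PySem.Set.contains (PySem.Set.ofList Str) (j : Int) = true ↔ (j : Int) ∈ Str :=
            (PySem.Set.contains_iff _ _).trans (PySem.Set.mem_ofList _ _)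
          have c3 : (j : Int) ∈ Full ↔ 1 ≤ (j : Int) ∧ (j : Int) < (w0 : Int) - 1 := by
            rw [hFulldef]; exact PySem.List.mem_pyRange_one
          have c4 : (i : Int) ∈ PySem.List.pyRange 1 ((maze.length : Int) - 1) 1 ↔
              1 ≤ (i : Int) ∧ (i : Int) < (maze.length : Int) - 1 := PySem.List.mem_pyRange_one
          simp only [Bool.or_eq_true, Bool.and_eq_true, decide_eq_true_eq, c1, c2, c3, c4]
        split_ifs with h1 h2 h2 <;> first
          | rfl
          | (exact absurd (hmem.1 h1.1) (by simpa using fun hh => h2 ⟨hj, hh⟩))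
          | (exact absurd (hmem.2 h2.2) (fun hh => h1 ⟨hh, hi, hj⟩))
      · rw [if_neg (by rintro ⟨-, -, h⟩; exact hj h), if_neg (by rintro ⟨h, -⟩; exact hj h)]
    · rw [if_neg (by rintro ⟨-, h, -⟩; exact hi h)]
      have hrow : maze.getD i [] = [] := List.getD_eq_default _ _ (by omega)
      rw [hrow]
      simp
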